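-- pv_equiv track=rewrite | github.com/sp92231/cap4601 | SPortal_PlayervsComputerVersion.py | countTwoInRow
-- ===== SOURCE A (Python) =====
-- def countTwoInRow(board, player):
--     count = 0
--
--     # Checking for twos.
--     def countPlayer(line):
--         amtTwo = 0
--         for x in line:
--             if x == player:
--                 amtTwo += 1
--         return amtTwo
--
--     # Checking rows and columns.
--     for i in range(len(board)):
--         # Initializing board.
--         row = board[i]
--         column = [board[j][i] for j in range(len(board))]
--
--         # Get the counts.
--         rowCount = countPlayer(row)
--         columnCount = countPlayer(column)
--
--         # Adding to count if there are two winning values.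
--         if rowCount == 2:
--             count += 1
--         if columnCount == 2:
--             count += 1
--
--     # Checking Diagonals.
--     diagonalL = [board[i][i] for i in range(len(board))]
--     diagonalR = [board[i][len(board) - 1 - i] for i in range(len(board))]
--
--     # Count the number of twos in diagonals
--     diagonalLCount = countPlayer(diagonalL)
--     diagonalRCount = countPlayer(diagonalR)
--
--     # Add to count if there are exactly 2 winning values in either diagonal
--     if diagonalLCount == 2:
--         count += 1
--     if diagonalRCount == 2:
--         count += 1
--
--     return count
-- ===== SOURCE B (Python) =====
-- def countTwoInRow(board, player):
--     n = len(board)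
--     colTot = [0] * n
--     diagL = 0
--     diagR = 0
--     res = 0
--     for i, row in enumerate(board):
--         if sum(1 if x == player else 0 for x in row) == 2:
--             res += 1
--         colTot = [c + (1 if x == player else 0) for c, x in zip(colTot, row)]
--         if row[i] == player:
--             diagL += 1
--         if row[n - 1 - i] == player:
--             diagR += 1
--     for c in colTot:
--         if c == 2:
--             res += 1
--     if diagL == 2:
--         res += 1
--     if diagR == 2:
--         res += 1
--     return res
-- ===== Notes on version B (the rewrite author's own statement) =====
-- stated objective: alternative
-- what changed: A builds each column list by indexed comprehension and re-counts every row/column/diagonal with a helper; B makes a single pass over the rows maintaining a zip-updated list of running column totals plus diagonal counters, then counts which totals equal 2.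
import Mathlib
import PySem

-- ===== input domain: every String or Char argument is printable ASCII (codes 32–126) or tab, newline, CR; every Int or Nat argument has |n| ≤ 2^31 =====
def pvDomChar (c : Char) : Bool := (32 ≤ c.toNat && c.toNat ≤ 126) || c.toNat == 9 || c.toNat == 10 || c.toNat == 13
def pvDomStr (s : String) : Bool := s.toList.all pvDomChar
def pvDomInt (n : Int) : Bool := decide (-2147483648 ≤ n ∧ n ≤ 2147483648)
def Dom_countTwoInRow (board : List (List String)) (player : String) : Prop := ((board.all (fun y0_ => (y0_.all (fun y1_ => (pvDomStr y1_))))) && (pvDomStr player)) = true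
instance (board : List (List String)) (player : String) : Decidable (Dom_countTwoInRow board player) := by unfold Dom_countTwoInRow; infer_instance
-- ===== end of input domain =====

-- B replaces A's per-index row/column list building with one pass over the rows that
-- keeps running column/diagonal counters (a zip-updated counter list); same result.

-- ===== PORT A =====
-- A's inner helper countPlayer(line)
def cntPlayerA (player : String) (line : List String) : Int :=
  line.foldl (fun a x => if x == player then a + 1 else a) 0

def countTwoInRow (board : List (List String)) (player : String) : Int :=
  let n : Int := board.length
  let count : Int := (PySem.List.pyRange 0 n 1).foldl (fun count i =>
    let row := PySem.List.pyGetD board i []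
    let column := (PySem.List.pyRange 0 n 1).map (fun j => PySem.List.pyGetD (PySem.List.pyGetD board j []) i "")
    let rowCount := cntPlayerA player row
    let columnCount := cntPlayerA player column
    let count := if rowCount == 2 then count + 1 else count
    if columnCount == 2 then count + 1 else count) 0
  let diagonalL := (PySem.List.pyRange 0 n 1).map (fun i => PySem.List.pyGetD (PySem.List.pyGetD board i []) i "")
  let diagonalR := (PySem.List.pyRange 0 n 1).map (fun i => PySem.List.pyGetD (PySem.List.pyGetD board i []) (n - 1 - i) "")
  let diagonalLCount := cntPlayerA player diagonalL
  let diagonalRCount := cntPlayerA player diagonalR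
  let count := if diagonalLCount == 2 then count + 1 else count
  if diagonalRCount == 2 then count + 1 else count

-- ===== PORT B =====
def countTwoInRow_alt (board : List (List String)) (player : String) : Int :=
  let n : Int := board.length
  let st := (PySem.List.enumerate board 0).foldl
    (fun (st : Int × List Int × Int × Int) (ir : Int × List String) =>
      let res := if (ir.2.foldl (fun a x => a + (if x == player then (1:Int) else 0)) 0) == 2 then st.1 + 1 else st.1
      let colTot := List.zipWith (fun c x => c + (if x == player then (1:Int) else 0)) st.2.1 ir.2
      let dl := if PySem.List.pyGetD ir.2 ir.1 "" == player then st.2.2.1 + 1 else st.2.2.1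
      let dr := if PySem.List.pyGetD ir.2 (n - 1 - ir.1) "" == player then st.2.2.2 + 1 else st.2.2.2
      (res, colTot, dl, dr))
    (0, List.replicate board.length (0:Int), 0, 0)
  let res := st.2.1.foldl (fun a c => if c == 2 then a + 1 else a) st.1
  let res := if st.2.2.1 == 2 then res + 1 else res
  if st.2.2.2 == 2 then res + 1 else res

-- ===== PRECONDITION & SPEC =====
-- Pre_ excludes exactly the ragged boards with a row shorter than len(board), on which A's
-- column/diagonal indexing raises IndexError.
def Pre_countTwoInRow (board : List (List String)) (player : String) : Prop :=
  ∀ row ∈ board, board.length ≤ row.length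
instance (board : List (List String)) (player : String) : Decidable (Pre_countTwoInRow board player) := by unfold Pre_countTwoInRow; infer_instance

def pvWitness_countTwoInRow : List (List String) × String := ([["x","o"],["o","x"]], "x")

def Spec_countTwoInRow (board : List (List String)) (player : String) (out : Int) : Prop := out = countTwoInRow_alt board player
instance (board : List (List String)) (player : String) (out : Int) : Decidable (Spec_countTwoInRow board player out) := by unfold Spec_countTwoInRow; infer_instance

-- ===== CLAIM (what is proved, stated in full; the proofs are below) =====
def Claim_equal_countTwoInRow : Prop := ∀ (board : List (List String)) (player : String), Dom_countTwoInRow board player → Pre_countTwoInRow board player → Spec_countTwoInRow board player (countTwoInRow board player)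

-- ===== LEMMAS AND PROOFS =====

-- A's countPlayer is a countP
theorem cntA_eq (player : String) (l : List String) :
    cntPlayerA player l = (l.countP (fun x => x == player) : Int) := by
  simpa [cntPlayerA, List.count_eq_countP] using PySem.List.foldl_beq_add_one l player 0

-- B's inline sum is the same countP
theorem cntB_eq (player : String) (l : List String) :
    l.foldl (fun a x => a + (if x == player then (1:Int) else 0)) 0
      = (l.countP (fun x => x == player) : Int) := by
  rw [PySem.List.foldl_add l (fun x => if x == player then (1:Int) else 0) 0,
      PySem.List.sum_map_ite_one_zero (fun x => x == player) l]
  simp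

-- A's loop body adds two 0/1 indicators per index
theorem foldl_two_if {α : Type} (f g : α → Bool) (l : List α) (a : Int) :
    l.foldl (fun c i => if g i then (if f i then c + 1 else c) + 1 else (if f i then c + 1 else c)) a
      = a + (l.countP f : Int) + (l.countP g : Int) := by
  induction l generalizing a with
  | nil => simp
  | cons x xs ih =>
    simp only [List.foldl_cons, ih, List.countP_cons]
    by_cases hf : f x <;> by_cases hg : g x <;> simp [hf, hg] <;> omega

-- a countP over indices of the row list is a countP over the rows
theorem countP_board (board : List (List String)) (q : List String → Bool) :
    (PySem.List.pyRange 0 (board.length : Int)).countP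
        (fun j => q (PySem.List.pyGetD board j [])) = board.countP q := by
  conv_rhs => rw [← PySem.List.map_pyGetD_pyRange_zero board []]
  simp only [PySem.List.len_eq]
  rw [List.countP_map]
  rfl

-- running column totals, as B's loop maintains them
def colAcc (player : String) (rows : List (List String)) (ct : List Int) : List Int :=
  rows.foldl (fun ct r => List.zipWith (fun c x => c + (if x == player then (1:Int) else 0)) ct r) ct

theorem colAcc_length (player : String) :
    ∀ (rows : List (List String)) (ct : List Int),
      (∀ r ∈ rows, ct.length ≤ r.length) → (colAcc player rows ct).length = ct.length := by
  intro rows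
  induction rows with
  | nil => intro ct _; rfl
  | cons r rs ih =>
    intro ct h
    have hr : ct.length ≤ r.length := h r (by simp)
    have hlen : (List.zipWith (fun c x => c + (if x == player then (1:Int) else 0)) ct r).length = ct.length := by
      simp [List.length_zipWith, Nat.min_eq_left hr]
    calc (colAcc player (r :: rs) ct).length
        = (colAcc player rs (List.zipWith (fun c x => c + (if x == player then (1:Int) else 0)) ct r)).length := rfl
      _ = ct.length := by
          rw [ih _ (by intro r' hr'; rw [hlen]; exact h r' (by simp [hr']))]
          exact hlen

theorem colAcc_getD (player : String) :
    ∀ (rows : List (List String)) (ct : List Int) (j : Nat),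
      (∀ r ∈ rows, ct.length ≤ r.length) → j < ct.length →
      (colAcc player rows ct).getD j 0
        = ct.getD j 0 + (rows.countP (fun r => r.getD j "" == player) : Int) := by
  intro rows
  induction rows with
  | nil => intro ct j _ _; simp [colAcc]
  | cons r rs ih =>
    intro ct j h hj
    have hr : ct.length ≤ r.length := h r (by simp)
    have hlen : (List.zipWith (fun c x => c + (if x == player then (1:Int) else 0)) ct r).length = ct.length := by
      simp [List.length_zipWith, Nat.min_eq_left hr]
    have step : (colAcc player (r :: rs) ct)
        = colAcc player rs (List.zipWith (fun c x => c + (if x == player then (1:Int) else 0)) ct r) := rfl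
    rw [step, ih _ j (by intro r' hr'; rw [hlen]; exact h r' (by simp [hr'])) (by omega)]
    have hj' : j < (List.zipWith (fun c x => c + (if x == player then (1:Int) else 0)) ct r).length := by omega
    have hjr : j < r.length := by omega
    rw [List.getD_eq_getElem _ _ hj', List.getD_eq_getElem _ _ hj, List.getElem_zipWith,
        List.countP_cons]
    rw [List.getD_eq_getElem r "" hjr]
    by_cases hm : r[j] == player <;> simp [hm] <;> omega

theorem colAcc_eq_map (player : String) (board : List (List String))
    (h : ∀ r ∈ board, board.length ≤ r.length) :
    colAcc player board (List.replicate board.length 0)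
      = (PySem.List.pyRange 0 (PySem.List.len board)).map
          (fun j => (board.countP (fun r => PySem.List.pyGetD r j "" == player) : Int)) := by
  have hct : (List.replicate board.length (0:Int)).length = board.length := by simp
  apply List.ext_getElem
  · rw [colAcc_length player board _ (by intro r hr; rw [hct]; exact h r hr)]
    simp [PySem.List.pyRange_one]
  · intro j h1 h2
    have hjn : j < board.length := by
      simpa [PySem.List.pyRange_one] using h2
    have lhs : (colAcc player board (List.replicate board.length 0))[j]
        = (colAcc player board (List.replicate board.length 0)).getD j 0 :=
      (List.getD_eq_getElem _ _ h1).symm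
    rw [lhs, colAcc_getD player board _ j (by intro r hr; rw [hct]; exact h r hr) (by omega)]
    simp [PySem.List.pyRange_one, List.getElem_map, hjn]

-- characterization of B's single pass
theorem bfold (player : String) (n : Int) :
    ∀ (rows : List (List String)) (k : Int) (res : Int) (ct : List Int) (dl dr : Int),
    (PySem.List.enumerate rows k).foldl
      (fun (st : Int × List Int × Int × Int) (ir : Int × List String) =>
        (if (ir.2.foldl (fun a x => a + (if x == player then (1:Int) else 0)) 0) == 2 then st.1 + 1 else st.1,
         List.zipWith (fun c x => c + (if x == player then (1:Int) else 0)) st.2.1 ir.2,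
         if PySem.List.pyGetD ir.2 ir.1 "" == player then st.2.2.1 + 1 else st.2.2.1,
         if PySem.List.pyGetD ir.2 (n - 1 - ir.1) "" == player then st.2.2.2 + 1 else st.2.2.2))
      (res, ct, dl, dr)
    = (res + (rows.countP (fun r => (r.foldl (fun a x => a + (if x == player then (1:Int) else 0)) 0) == 2) : Int),
       colAcc player rows ct,
       dl + ((PySem.List.enumerate rows k).countP (fun ir => PySem.List.pyGetD ir.2 ir.1 "" == player) : Int),
       dr + ((PySem.List.enumerate rows k).countP (fun ir => PySem.List.pyGetD ir.2 (n - 1 - ir.1) "" == player) : Int)) := by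
  intro rows
  induction rows with
  | nil => intro k res ct dl dr; simp [PySem.List.enumerate_nil, colAcc]
  | cons r rs ih =>
    intro k res ct dl dr
    rw [PySem.List.enumerate_cons, List.foldl_cons, ih]
    refine Prod.ext ?_ (Prod.ext ?_ (Prod.ext ?_ ?_)) <;>
      simp only [List.countP_cons, colAcc, List.foldl_cons] <;>
      split_ifs <;> push_cast <;> ring_nf

-- ===== VERDICT (by name: the statement is the Claim_ definition above) =====
theorem countTwoInRow_spec : Claim_equal_countTwoInRow := by
  intro board player _ hpre
  have hpre' : ∀ r ∈ board, board.length ≤ r.length := hpre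
  show countTwoInRow board player = countTwoInRow_alt board player
  simp only [countTwoInRow, countTwoInRow_alt]
  rw [bfold]
  rw [PySem.List.enumerate_eq_map_pyRange board []]
  rw [colAcc_eq_map player board hpre']
  simp only [cntA_eq, cntB_eq, PySem.List.len_eq, List.countP_map,
    Function.comp_def, zero_add]
  rw [foldl_two_if]
  rw [PySem.List.foldl_beq_add_one]
  simp only [List.count_eq_countP, List.countP_map, Function.comp_def, zero_add]
  have hrow := countP_board board (fun r => ((List.countP (fun x => x == player) r : Int) == 2))
  beta_reduce at hrow
  have hcol : List.countP
        (fun i => (↑(List.countP (fun x => PySem.List.pyGetD (PySem.List.pyGetD board x []) i "" == player)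
            (PySem.List.pyRange 0 (board.length : Int))) : Int) == 2)
        (PySem.List.pyRange 0 (board.length : Int))
      = List.countP
        (fun i => (↑(List.countP (fun r => PySem.List.pyGetD r i "" == player) board) : Int) == 2)
        (PySem.List.pyRange 0 (board.length : Int)) := by
    refine List.countP_congr ?_
    intro i _
    have h := countP_board board (fun r => PySem.List.pyGetD r i "" == player)
    beta_reduce at h
    rw [h]
  rw [hrow, hcol]
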